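-- pv_equiv track=rewrite | github.com/SanishKumar/Python-DSA-NPTEL | Week 2 Code.py | primepartition
-- ===== SOURCE A (Python) =====
-- def prime(n):
--     if n<=1:
--         return False
--     for i in range (2,n):
--         if n%i==0:
--             return False
--     return True
--
-- def primepartition(m):
--
--     if m<=0:
--         return False
--     else:
--         for i in range(2,m+1):
--             if prime(m-i) and prime(i):
--                 return True
--         return False
-- ===== SOURCE B (Python) =====
-- def _isprime(n):
--     d = 2
--     while d * d <= n:
--         if n % d == 0:
--             return False
--         d += 1
--     return n >= 2
--
-- def primepartition(m):
--     return any(_isprime(i) and _isprime(m - i) for i in range(2, m // 2 + 1))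
-- ===== Notes on version B (the rewrite author's own statement) =====
-- stated objective: faster
-- what changed: Primality by trial division only up to sqrt(n) (while d*d<=n) instead of scanning all divisors up to n-1, and the candidate scan runs only to m//2 using the symmetry of the partition, with any() over a generator instead of an explicit early-return loop.
import Mathlib
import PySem

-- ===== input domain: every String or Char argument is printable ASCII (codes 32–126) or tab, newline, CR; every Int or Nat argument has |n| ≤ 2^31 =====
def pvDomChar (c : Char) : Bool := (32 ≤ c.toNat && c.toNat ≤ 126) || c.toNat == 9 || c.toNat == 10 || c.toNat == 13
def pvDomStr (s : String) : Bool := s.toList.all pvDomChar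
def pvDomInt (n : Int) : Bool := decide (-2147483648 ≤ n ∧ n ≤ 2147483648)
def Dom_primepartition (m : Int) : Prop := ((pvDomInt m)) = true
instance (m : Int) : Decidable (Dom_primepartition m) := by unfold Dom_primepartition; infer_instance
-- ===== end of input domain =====

-- B replaces A's divisor scan up to n-1 by trial division up to sqrt(n) and scans
-- candidates only up to m//2 (symmetry of the partition): a faster exact algorithm.

-- ===== PORT A =====
-- A's `prime`: `return False` inside the for-loop is the early exit of `.any`.
def pvPrimeA (n : Int) : Bool :=
  if n ≤ 1 then false
  else !((PySem.List.pyRange 2 n 1).any (fun i => PySem.Int.mod n i == 0))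

def primepartition (m : Int) : Bool :=
  if m ≤ 0 then false
  else (PySem.List.pyRange 2 (m + 1) 1).any (fun i => pvPrimeA (m - i) && pvPrimeA i)

-- ===== PORT B =====
-- B's `_isprime`: the while loop `while d*d <= n` as recursion on d; `return False`
-- inside the loop is the `false` branch, the final `return n >= 2` is the exit case.
def pvIsprimeAux (n d : Int) : Bool :=
  if h : d * d ≤ n then
    if PySem.Int.mod n d == 0 then false
    else pvIsprimeAux n (d + 1)
  else decide (2 ≤ n)
termination_by (n + 1 - d).toNat
decreasing_by
  have hd : d ≤ n := by nlinarith [mul_self_nonneg d, mul_self_nonneg (d - 1)]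
  omega

def pvIsprimeB (n : Int) : Bool := pvIsprimeAux n 2

def primepartition_alt (m : Int) : Bool :=
  (PySem.List.pyRange 2 (PySem.Int.floordiv m 2 + 1) 1).any
    (fun i => pvIsprimeB i && pvIsprimeB (m - i))

-- ===== PRECONDITION & SPEC =====
def Spec_primepartition (m : Int) (out : Bool) : Prop := out = primepartition_alt m
instance (m : Int) (out : Bool) : Decidable (Spec_primepartition m out) := by unfold Spec_primepartition; infer_instance

-- ===== CLAIM (what is proved, stated in full; the proofs are below) =====
def Claim_equal_primepartition : Prop := ∀ (m : Int), Dom_primepartition m → Spec_primepartition m (primepartition m)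

-- ===== LEMMAS AND PROOFS =====

-- B's while loop tests exactly the divisors e ≥ d with e*e ≤ n.
theorem pvIsprimeAux_eq_true (n d : Int) (hd0 : 0 ≤ d) :
    pvIsprimeAux n d = true ↔
      (2 ≤ n ∧ ∀ e : Int, d ≤ e → e * e ≤ n → ¬ e ∣ n) := by
  induction d using pvIsprimeAux.induct (n := n) with
  | case1 d h hmod =>
      rw [pvIsprimeAux, dif_pos h, if_pos hmod]
      constructor
      · intro hfalse; cases hfalse
      · rintro ⟨-, hall⟩
        exact absurd ((PySem.Int.mod_eq_zero_iff_dvd n d).mp (by simpa using hmod))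
          (hall d le_rfl h)
  | case2 d h hmod ih =>
      rw [pvIsprimeAux, dif_pos h, if_neg hmod, ih (by omega)]
      constructor
      · rintro ⟨h2, hall⟩
        refine ⟨h2, fun e hde hen => ?_⟩
        rcases eq_or_lt_of_le hde with heq | hlt
        · subst heq
          intro hdvd
          exact absurd ((PySem.Int.mod_eq_zero_iff_dvd n d).mpr hdvd) (by simpa using hmod)
        · exact hall e (by omega) hen
      · rintro ⟨h2, hall⟩
        exact ⟨h2, fun e hde hen => hall e (by omega) hen⟩
  | case3 d h =>
      rw [pvIsprimeAux, dif_neg h]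
      constructor
      · intro h2
        refine ⟨by simpa using h2, fun e hde hen => absurd hen ?_⟩
        nlinarith [mul_self_nonneg (e - d), mul_self_nonneg d]
      · rintro ⟨h2, -⟩
        simpa using h2

-- A's `prime` tests exactly the divisors 2 ≤ i < n.
theorem pvPrimeA_eq_true (n : Int) :
    pvPrimeA n = true ↔ (2 ≤ n ∧ ∀ i : Int, 2 ≤ i → i < n → ¬ i ∣ n) := by
  unfold pvPrimeA
  by_cases h : n ≤ 1
  · rw [if_pos h]
    constructor
    · intro hf; cases hf
    · rintro ⟨h2, -⟩; omega
  · rw [if_neg h]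
    simp only [Bool.not_eq_true', List.any_eq_false,
      PySem.List.mem_pyRange_one, beq_iff_eq]
    constructor
    · intro hall
      refine ⟨by omega, fun i h2 hlt hdvd => ?_⟩
      exact absurd ((PySem.Int.mod_eq_zero_iff_dvd n i).mpr hdvd) (hall i ⟨h2, hlt⟩)
    · rintro ⟨-, hall⟩ i ⟨h2, hlt⟩ hmod
      exact hall i h2 hlt ((PySem.Int.mod_eq_zero_iff_dvd n i).mp hmod)

-- sqrt-bounded trial division agrees with A's full divisor scan.
theorem pvIsprimeB_eq_primeA (n : Int) : pvIsprimeB n = pvPrimeA n := by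
  rw [Bool.eq_iff_iff]
  unfold pvIsprimeB
  rw [pvIsprimeAux_eq_true n 2 (by norm_num), pvPrimeA_eq_true]
  constructor
  · rintro ⟨h2, hall⟩
    refine ⟨h2, fun i hi hlt hdvd => ?_⟩
    rcases hdvd with ⟨k, hk⟩
    have hk2 : 2 ≤ k := by
      by_contra hc
      push Not at hc
      have hik : i * k ≤ i := by nlinarith
      rw [← hk] at hik
      omega
    rcases le_total i k with hik | hki
    · exact hall i (by omega) (by nlinarith) ⟨k, hk⟩
    · exact hall k (by omega) (by nlinarith) ⟨i, by rw [hk, mul_comm]⟩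
  · rintro ⟨h2, hall⟩
    refine ⟨h2, fun e h2e hen => hall e h2e (by nlinarith)⟩

-- the partition scan can stop at m//2: a witness pair (i, m-i) can be reordered
-- so that its smaller member is the scanned index.
theorem pvScan_iff (m : Int) :
    ((∃ i : Int, 2 ≤ i ∧ i < m + 1 ∧ (pvPrimeA (m - i) && pvPrimeA i) = true) ↔
     (∃ i : Int, 2 ≤ i ∧ i < PySem.Int.floordiv m 2 + 1 ∧
        (pvIsprimeB i && pvIsprimeB (m - i)) = true)) := by
  simp only [Bool.and_eq_true, pvIsprimeB_eq_primeA]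
  constructor
  · rintro ⟨i, h2, hlt, hmi, hi⟩
    have hi2 : 2 ≤ i := h2
    have hmi2 : 2 ≤ m - i := ((pvPrimeA_eq_true _).mp hmi).1
    rcases le_total i (m - i) with hle | hge
    · refine ⟨i, h2, ?_, hi, hmi⟩
      have : i ≤ PySem.Int.floordiv m 2 :=
        (PySem.Int.le_floordiv_iff_mul_le (by norm_num)).mpr (by omega)
      omega
    · refine ⟨m - i, hmi2, ?_, hmi, by simpa using hi⟩
      have : m - i ≤ PySem.Int.floordiv m 2 :=
        (PySem.Int.le_floordiv_iff_mul_le (by norm_num)).mpr (by omega)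
      omega
  · rintro ⟨i, h2, hlt, hi, hmi⟩
    have : i * 2 ≤ m :=
      (PySem.Int.le_floordiv_iff_mul_le (by norm_num)).mp (by omega)
    exact ⟨i, h2, by omega, hmi, hi⟩

-- ===== VERDICT (by name: the statement is the Claim_ definition above) =====
theorem primepartition_spec : Claim_equal_primepartition := by
  intro m _
  unfold Spec_primepartition primepartition primepartition_alt
  by_cases hm : m ≤ 0
  · simp only [hm, if_true]
    symm
    rw [List.any_eq_false]
    intro i hi
    rw [PySem.List.mem_pyRange_one] at hi
    have hfd : PySem.Int.floordiv m 2 ≤ 0 := by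
      by_contra h
      have := (PySem.Int.le_floordiv_iff_mul_le (a := m) (b := 2) (q := 1) (by norm_num)).mp (by omega)
      omega
    omega
  · simp only [hm, if_false]
    rw [Bool.eq_iff_iff, List.any_eq_true, List.any_eq_true]
    simp only [PySem.List.mem_pyRange_one]
    constructor
    · rintro ⟨i, ⟨h2, hlt⟩, hp⟩
      rcases (pvScan_iff m).mp ⟨i, h2, hlt, Bool.and_eq_true .. ▸ hp⟩ with ⟨j, hj2, hjlt, hjp⟩
      exact ⟨j, ⟨hj2, hjlt⟩, hjp⟩
    · rintro ⟨i, ⟨h2, hlt⟩, hp⟩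
      rcases (pvScan_iff m).mpr ⟨i, h2, hlt, hp⟩ with ⟨j, hj2, hjlt, hjp⟩
      exact ⟨j, ⟨hj2, hjlt⟩, hjp⟩
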